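-- pv_equiv track=rewrite | github.com/Infinidrix/competitive-programming | Day 21/q3.py | optimal_stacking
-- ===== SOURCE A (Python) =====
-- def optimal_stacking(gifts, specials):
-- 	max_index = 0
-- 	movt_count = 0
-- 	for i in range(len(specials)):
-- 		found = False
-- 		for j in range(max_index, len(gifts)):
-- 			if specials[i] == gifts[j]:
-- 				movt_count += 2*(j - i) + 1
-- 				max_index = j
-- 				found = True
-- 				break;
-- 		if not found:
-- 			movt_count += 1
-- 	return movt_count
-- ===== SOURCE B (Python) =====
-- from bisect import bisect_left
--
--
-- def optimal_stacking(gifts, specials):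
--     positions = {}
--     for j, g in enumerate(gifts):
--         positions.setdefault(g, []).append(j)
--     max_index = 0
--     total = 0
--     for i, s in enumerate(specials):
--         idxs = positions.get(s, [])
--         k = bisect_left(idxs, max_index)
--         if k < len(idxs):
--             j = idxs[k]
--             total += 2 * (j - i) + 1
--             max_index = j
--         else:
--             total += 1
--     return total
-- ===== Notes on version B (the rewrite author's own statement) =====
-- stated objective: faster
-- what changed: Replaces A's per-special linear rescan of gifts from max_index with a precomputed value-to-sorted-occurrence-indices dict queried by bisect_left for the first index >= max_index.
import Mathlib
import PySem

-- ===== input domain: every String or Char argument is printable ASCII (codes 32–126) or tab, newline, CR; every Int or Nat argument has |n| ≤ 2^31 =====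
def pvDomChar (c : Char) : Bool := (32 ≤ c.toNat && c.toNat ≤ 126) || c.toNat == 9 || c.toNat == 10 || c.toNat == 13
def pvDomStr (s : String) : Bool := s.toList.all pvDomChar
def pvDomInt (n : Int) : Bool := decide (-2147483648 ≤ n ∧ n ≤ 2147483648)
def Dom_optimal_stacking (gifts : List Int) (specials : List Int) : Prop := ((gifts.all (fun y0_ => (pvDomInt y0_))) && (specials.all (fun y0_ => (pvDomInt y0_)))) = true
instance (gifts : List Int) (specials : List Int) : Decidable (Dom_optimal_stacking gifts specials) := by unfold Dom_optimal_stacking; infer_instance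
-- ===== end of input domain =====

-- B replaces A's per-special linear rescan of gifts with a precomputed value→sorted-index map
-- queried by binary search for the first occurrence index ≥ max_index (objective: faster).

-- ===== PORT A =====
-- inner loop 'for j in range(max_index, len(gifts)): … break' of A; gifts.getD j 0 is gifts[j]
-- (exact: the branch is guarded by j < len(gifts))
def aFind (gifts : List Int) (s : Int) (j : Nat) : Option Nat :=
  if _h : j < gifts.length then
    if gifts.getD j 0 = s then some j
    else aFind gifts s (j + 1)
  else none
termination_by gifts.length - j

-- outer loop 'for i in range(len(specials))' with state (max_index, movt_count)
def aLoop (gifts : List Int) : List Int → Nat → Nat → Int → Int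
  | [], _, _, movt_count => movt_count
  | s :: rest, i, max_index, movt_count =>
    match aFind gifts s max_index with
    | some j => aLoop gifts rest (i + 1) j (movt_count + 2 * ((j : Int) - (i : Int)) + 1)
    | none   => aLoop gifts rest (i + 1) max_index (movt_count + 1)

def optimal_stacking (gifts : List Int) (specials : List Int) : Int :=
  aLoop gifts specials 0 0 0

-- ===== PORT B =====
-- 'positions = {}; for j, g in enumerate(gifts): positions.setdefault(g, []).append(j)'
-- (Dict.modify g [] (· ++ [j]) is exactly setdefault(g, []).append(j); indices j are Python ints)
def buildPositions (gifts : List Int) : PySem.Dict Int (List Int) :=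
  ((gifts.zipIdx).map (fun p => (p.1, (p.2 : Int)))).foldl
    (fun d p => d.modify p.1 [] (· ++ [p.2])) PySem.Dict.empty

-- 'for i, s in enumerate(specials): idxs = positions.get(s, []); k = bisect_left(idxs, max_index); …'
-- (idxs.getD k 0 is idxs[k]: exact, guarded by k < len(idxs))
def bLoop (positions : PySem.Dict Int (List Int)) : List Int → Nat → Int → Int → Int
  | [], _, _, total => total
  | s :: rest, i, max_index, total =>
    let idxs := positions.getD s []
    let k := PySem.List.bisectLeft idxs max_index
    if k < idxs.length then
      let j := idxs.getD k 0
      bLoop positions rest (i + 1) j (total + 2 * (j - (i : Int)) + 1)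
    else
      bLoop positions rest (i + 1) max_index (total + 1)

def optimal_stacking_alt (gifts : List Int) (specials : List Int) : Int :=
  bLoop (buildPositions gifts) specials 0 0 0

-- ===== PRECONDITION & SPEC =====
def Spec_optimal_stacking (gifts : List Int) (specials : List Int) (out : Int) : Prop := out = optimal_stacking_alt gifts specials
instance (gifts : List Int) (specials : List Int) (out : Int) : Decidable (Spec_optimal_stacking gifts specials out) := by unfold Spec_optimal_stacking; infer_instance

-- ===== CLAIM (what is proved, stated in full; the proofs are below) =====
def Claim_equal_optimal_stacking : Prop := ∀ (gifts : List Int) (specials : List Int), Dom_optimal_stacking gifts specials → Spec_optimal_stacking gifts specials (optimal_stacking gifts specials)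

-- ===== LEMMAS AND PROOFS =====

-- the occurrence-index list that buildPositions stores under key s
def occ (gifts : List Int) (s : Int) : List Int :=
  ((gifts.zipIdx.map (fun p => (p.1, (p.2 : Int)))).filter (fun p => p.1 == s)).map (·.2)

theorem pos_getD (gifts : List Int) (s : Int) :
    (buildPositions gifts).getD s [] = occ gifts s := by
  unfold buildPositions occ
  rw [PySem.Dict.getD_foldl_modify_append]
  simp

theorem occ_eq (gifts : List Int) (s : Int) :
    occ gifts s = (gifts.zipIdx.filter (fun q => q.1 == s)).map (fun q => ((q.2 : Nat) : Int)) := by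
  unfold occ
  rw [List.filter_map, List.map_map]
  rfl

theorem mem_occ (gifts : List Int) (s : Int) (x : Int) :
    x ∈ occ gifts s ↔ ∃ t : Nat, gifts[t]? = some s ∧ x = (t : Int) := by
  rw [occ_eq]
  simp only [List.mem_map, List.mem_filter]
  constructor
  · rintro ⟨q, ⟨hmem, hq⟩, rfl⟩
    refine ⟨q.2, ?_, rfl⟩
    have := List.mem_zipIdx_iff_getElem?.mp hmem
    simpa [show q.1 = s from by simpa using hq] using this
  · rintro ⟨t, ht, rfl⟩
    exact ⟨(s, t), ⟨List.mem_zipIdx_iff_getElem?.mpr ht, by simp⟩, rfl⟩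

theorem zipIdx_pairwise {α : Type} (l : List α) :
    List.Pairwise (fun p q : α × Nat => p.2 < q.2) l.zipIdx := by
  rw [List.pairwise_iff_getElem]
  intro i j hi hj hij
  simp only [List.getElem_zipIdx]
  omega

theorem occ_sorted (gifts : List Int) (s : Int) :
    List.Pairwise (· < ·) (occ gifts s) := by
  rw [occ_eq]
  refine List.Pairwise.map _ ?_ ((zipIdx_pairwise gifts).filter _)
  intro a b h
  exact_mod_cast h

theorem sorted_getElem_le {a : List Int} (h : List.Pairwise (· < ·) a)
    {i j : Nat} (hij : i ≤ j) (hj : j < a.length) : a[i]'(by omega) ≤ a[j] := by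
  rcases Nat.lt_or_ge i j with hlt | hge
  · exact le_of_lt ((List.pairwise_iff_getElem.mp h) i j (by omega) hj hlt)
  · have : i = j := by omega
    subst this; exact le_rfl

-- A's inner scan: what 'some j' / 'none' mean
theorem aFind_some (gifts : List Int) (s : Int) :
    ∀ (m j : Nat), aFind gifts s m = some j →
      m ≤ j ∧ j < gifts.length ∧ gifts.getD j 0 = s ∧
        ∀ t, m ≤ t → t < j → gifts.getD t 0 ≠ s := by
  intro m j h
  fun_induction aFind gifts s m with
  | case1 m hm hs => -- hit
    cases h
    exact ⟨le_rfl, hm, hs, fun t h1 h2 => absurd (lt_of_le_of_lt h1 h2) (lt_irrefl _)⟩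
  | case2 m hm hs ih =>
    obtain ⟨h1, h2, h3, h4⟩ := ih h
    refine ⟨by omega, h2, h3, fun t ht1 ht2 => ?_⟩
    rcases Nat.eq_or_lt_of_le ht1 with rfl | hlt
    · exact fun hc => hs hc
    · exact h4 t hlt ht2
  | case3 m hm => exact absurd h (by simp)

theorem aFind_none (gifts : List Int) (s : Int) :
    ∀ (m : Nat), aFind gifts s m = none →
      ∀ t, m ≤ t → t < gifts.length → gifts.getD t 0 ≠ s := by
  intro m h
  fun_induction aFind gifts s m with
  | case1 m hm hs => exact absurd h (by simp)
  | case2 m hm hs ih =>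
    intro t ht1 ht2
    rcases Nat.eq_or_lt_of_le ht1 with rfl | hlt
    · exact fun hc => hs hc
    · exact ih h t hlt ht2
  | case3 m hm => intro t ht1 ht2; omega

-- bisect_left on the occurrence list, against A's scan
theorem step_some (gifts : List Int) (s : Int) (m j : Nat)
    (h : aFind gifts s m = some j) :
    PySem.List.bisectLeft (occ gifts s) (m : Int) < (occ gifts s).length ∧
      (occ gifts s).getD (PySem.List.bisectLeft (occ gifts s) (m : Int)) 0 = (j : Int) := by
  obtain ⟨hmj, hjlen, hjs, hmin⟩ := aFind_some gifts s m j h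
  have hsorted := occ_sorted gifts s
  obtain ⟨hkle, hlo, hhi⟩ :=
    PySem.List.bisectLeft_spec (occ gifts s) (m : Int) (hsorted.imp le_of_lt)
  set a := occ gifts s with ha
  set k := PySem.List.bisectLeft a (m : Int) with hk
  have hjs' : gifts[j] = s := by rwa [List.getD_eq_getElem _ _ hjlen] at hjs
  have hjmem : (j : Int) ∈ a := by
    rw [ha, mem_occ]
    exact ⟨j, by rw [List.getElem?_eq_getElem hjlen, hjs'], rfl⟩
  obtain ⟨kj, hkj, hkjv⟩ := List.mem_iff_getElem.mp hjmem
  have hkkj : k ≤ kj := by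
    by_contra hc
    have := hlo kj hkj (by omega)
    rw [hkjv] at this
    exact absurd this (by omega)
  have hklen : k < a.length := lt_of_le_of_lt hkkj hkj
  refine ⟨hklen, ?_⟩
  have hvmem : a[k] ∈ occ gifts s := List.getElem_mem hklen
  rw [mem_occ] at hvmem
  obtain ⟨t, hts, htv⟩ := hvmem
  have htlen : t < gifts.length := by
    have := List.getElem?_eq_some_iff.mp hts
    exact this.1
  have htval : gifts.getD t 0 = s := by
    rw [List.getD_eq_getElem _ _ htlen]
    have := List.getElem?_eq_some_iff.mp hts
    exact this.2
  have hmk : (m : Int) ≤ a[k] := hhi k hklen le_rfl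
  have hmt : m ≤ t := by rw [htv] at hmk; exact_mod_cast hmk
  have htj : t ≤ j := by
    have : a[k] ≤ a[kj] := sorted_getElem_le hsorted hkkj hkj
    rw [htv, hkjv] at this
    exact_mod_cast this
  have : t = j := by
    rcases Nat.eq_or_lt_of_le htj with h' | h'
    · exact h'
    · exact absurd htval (hmin t hmt h')
  rw [List.getD_eq_getElem _ _ hklen, htv, this]

theorem step_none (gifts : List Int) (s : Int) (m : Nat)
    (h : aFind gifts s m = none) :
    ¬ PySem.List.bisectLeft (occ gifts s) (m : Int) < (occ gifts s).length := by
  intro hklen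
  have hsorted := occ_sorted gifts s
  obtain ⟨hkle, hlo, hhi⟩ :=
    PySem.List.bisectLeft_spec (occ gifts s) (m : Int) (hsorted.imp le_of_lt)
  set a := occ gifts s with ha
  set k := PySem.List.bisectLeft a (m : Int) with hk
  have hvmem : a[k] ∈ occ gifts s := List.getElem_mem hklen
  rw [mem_occ] at hvmem
  obtain ⟨t, hts, htv⟩ := hvmem
  have htlen : t < gifts.length := (List.getElem?_eq_some_iff.mp hts).1
  have htval : gifts.getD t 0 = s := by
    rw [List.getD_eq_getElem _ _ htlen]
    exact (List.getElem?_eq_some_iff.mp hts).2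
  have hmk : (m : Int) ≤ a[k] := hhi k hklen le_rfl
  have hmt : m ≤ t := by rw [htv] at hmk; exact_mod_cast hmk
  exact aFind_none gifts s m h t hmt htlen htval

theorem loop_eq (gifts : List Int) :
    ∀ (specials : List Int) (i m : Nat) (cnt : Int),
      bLoop (buildPositions gifts) specials i (m : Int) cnt = aLoop gifts specials i m cnt := by
  intro specials
  induction specials with
  | nil => intro i m cnt; rfl
  | cons s rest ih =>
    intro i m cnt
    simp only [bLoop, aLoop, pos_getD]
    cases haF : aFind gifts s m with
    | some j =>
      obtain ⟨hk, hv⟩ := step_some gifts s m j haF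
      rw [if_pos hk, hv, ih]
    | none =>
      rw [if_neg (step_none gifts s m haF), ih]

-- ===== VERDICT (by name: the statement is the Claim_ definition above) =====
theorem optimal_stacking_spec : Claim_equal_optimal_stacking := by
  intro gifts specials _
  unfold Spec_optimal_stacking optimal_stacking optimal_stacking_alt
  have h := loop_eq gifts specials 0 0 0
  exact_mod_cast h.symm
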